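-- pv_equiv track=rewrite | github.com/konradreyhe/sacred-composer | classical_music_gen.py | has_parallel_fifths_or_octaves
-- ===== SOURCE A (Python) =====
-- from typing import List, Tuple, Optional, Dict
--
-- def has_parallel_fifths_or_octaves(v1: Tuple[int, ...],
--                                    v2: Tuple[int, ...]) -> bool:
--     """Check if moving from voicing v1 to v2 creates parallel 5ths/8ves."""
--     for i in range(len(v1)):
--         for j in range(i + 1, len(v1)):
--             interval_before = (v1[j] - v1[i]) % 12
--             interval_after = (v2[j] - v2[i]) % 12
--             # Both are perfect 5th (7 semitones) or unison/octave (0)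
--             if interval_before in (0, 7) and interval_before == interval_after:
--                 # Check that both voices actually moved (parallel, not stationary)
--                 if v1[i] != v2[i] and v1[j] != v2[j]:
--                     return True
--     return False
-- ===== SOURCE B (Python) =====
-- def has_parallel_fifths_or_octaves(v1, v2):
--     """O(n): hash each moved voice by its (pitch-class before, pitch-class after);
--     a parallel 5th/8ve exists iff some later moved voice probes the key shifted by
--     t semitones for t in (0, 7)."""
--     seen = set()
--     for a, b in zip(v1, v2):
--         if a != b:
--             if ((a % 12, b % 12) in seen) or (((a - 7) % 12, (b - 7) % 12) in seen):
--                 return True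
--             seen.add((a % 12, b % 12))
--     return False
-- ===== Notes on version B (the rewrite author's own statement) =====
-- stated objective: faster
-- what changed: Replaced the quadratic all-pairs scan by a single pass that hashes each moved voice by its (pitch-class before, pitch-class after) and probes the two shifted keys (t = 0, 7), removing the inner loop.
-- outside the precondition, e.g. on has_parallel_fifths_or_octaves((0, 12, 9), (5, 17)): A returns True, B returns True; on has_parallel_fifths_or_octaves((0, 1, 2, 14), (5, 0, 12)): A raises IndexError, B returns False
import Mathlib
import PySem

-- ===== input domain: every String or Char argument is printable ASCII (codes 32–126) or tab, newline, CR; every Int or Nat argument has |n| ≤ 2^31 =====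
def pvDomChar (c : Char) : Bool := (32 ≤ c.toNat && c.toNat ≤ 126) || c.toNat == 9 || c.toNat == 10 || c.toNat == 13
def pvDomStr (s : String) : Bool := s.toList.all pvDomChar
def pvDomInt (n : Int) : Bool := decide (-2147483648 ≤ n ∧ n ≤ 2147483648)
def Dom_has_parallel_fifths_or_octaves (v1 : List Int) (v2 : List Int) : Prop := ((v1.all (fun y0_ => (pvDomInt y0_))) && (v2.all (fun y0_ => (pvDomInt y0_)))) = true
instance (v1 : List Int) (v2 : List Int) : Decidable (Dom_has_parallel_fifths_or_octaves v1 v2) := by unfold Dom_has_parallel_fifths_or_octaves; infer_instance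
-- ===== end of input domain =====

-- B replaces A's O(n^2) all-pairs scan with one O(n) pass hashing moved voices by
-- (pitch-class before, pitch-class after) and probing the keys shifted by 0 and 7.


-- ===== PORT A =====
-- inner pair test: interval_before in (0,7) and interval_before == interval_after and both voices moved
def hpCond (v1 : List Int) (v2 : List Int) (i : Int) (j : Int) : Bool :=
  let ib := PySem.Int.mod (PySem.List.pyGetD v1 j 0 - PySem.List.pyGetD v1 i 0) 12
  let ia := PySem.Int.mod (PySem.List.pyGetD v2 j 0 - PySem.List.pyGetD v2 i 0) 12
  ((ib == 0 || ib == 7) && ib == ia) &&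
    (PySem.List.pyGetD v1 i 0 != PySem.List.pyGetD v2 i 0 &&
     PySem.List.pyGetD v1 j 0 != PySem.List.pyGetD v2 j 0)

def has_parallel_fifths_or_octaves (v1 : List Int) (v2 : List Int) : Bool :=
  (PySem.List.pyRange 0 (v1.length : Int) 1).any fun i =>
    (PySem.List.pyRange (i + 1) (v1.length : Int) 1).any fun j => hpCond v1 v2 i j

-- ===== PORT B =====
def hpKey (p : Int × Int) : Int × Int := (PySem.Int.mod p.1 12, PySem.Int.mod p.2 12)

def hpKey7 (p : Int × Int) : Int × Int := (PySem.Int.mod (p.1 - 7) 12, PySem.Int.mod (p.2 - 7) 12)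

def hpAltLoop : List (Int × Int) → PySem.Set (Int × Int) → Bool
  | [], _ => false
  | p :: rest, seen =>
    if p.1 ≠ p.2 then
      if PySem.Set.contains seen (hpKey p) || PySem.Set.contains seen (hpKey7 p) then true
      else hpAltLoop rest (PySem.Set.add seen (hpKey p))
    else hpAltLoop rest seen

def has_parallel_fifths_or_octaves_alt (v1 : List Int) (v2 : List Int) : Bool :=
  hpAltLoop (v1.zip v2) PySem.Set.empty

-- ===== PRECONDITION & SPEC =====
-- Pre_ excludes length-mismatched voicings (len v2 < len v1 with at least one pair to check),
-- on which A may raise IndexError reading v2[j]; A returns True on some of them (when a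
-- parallel is found before the bad access) while B, which pairs the voices by zip, never raises.
def Pre_has_parallel_fifths_or_octaves (v1 : List Int) (v2 : List Int) : Prop :=
  v1.length ≤ v2.length ∨ v1.length ≤ 1
instance (v1 : List Int) (v2 : List Int) : Decidable (Pre_has_parallel_fifths_or_octaves v1 v2) := by
  unfold Pre_has_parallel_fifths_or_octaves; infer_instance

def pvWitness_has_parallel_fifths_or_octaves : List Int × List Int := ([60, 64, 67], [62, 66, 69])

def Spec_has_parallel_fifths_or_octaves (v1 : List Int) (v2 : List Int) (out : Bool) : Prop := out = has_parallel_fifths_or_octaves_alt v1 v2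
instance (v1 : List Int) (v2 : List Int) (out : Bool) : Decidable (Spec_has_parallel_fifths_or_octaves v1 v2 out) := by unfold Spec_has_parallel_fifths_or_octaves; infer_instance

-- ===== CLAIM (what is proved, stated in full; the proofs are below) =====
def Claim_equal_has_parallel_fifths_or_octaves : Prop := ∀ (v1 : List Int) (v2 : List Int), Dom_has_parallel_fifths_or_octaves v1 v2 → Pre_has_parallel_fifths_or_octaves v1 v2 → Spec_has_parallel_fifths_or_octaves v1 v2 (has_parallel_fifths_or_octaves v1 v2)

-- ===== LEMMAS AND PROOFS =====

-- common pair condition on the zipped voicings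
def hpC (p : Int × Int) (q : Int × Int) : Prop :=
  ((PySem.Int.mod (q.1 - p.1) 12 = 0 ∨ PySem.Int.mod (q.1 - p.1) 12 = 7) ∧
    PySem.Int.mod (q.1 - p.1) 12 = PySem.Int.mod (q.2 - p.2) 12) ∧
  (p.1 ≠ p.2 ∧ q.1 ≠ q.2)

def hpPairEx (l : List (Int × Int)) : Prop :=
  ∃ (i j : Nat) (_ : i < j) (hj : j < l.length), hpC l[i] l[j]

theorem hpC_iff_keys (p q : Int × Int) :
    hpC p q ↔ (p.1 ≠ p.2 ∧ q.1 ≠ q.2) ∧ (hpKey p = hpKey q ∨ hpKey p = hpKey7 q) := by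
  simp only [hpC, hpKey, hpKey7, Prod.mk.injEq,
    PySem.Int.mod_eq_emod_of_pos (a := q.1 - p.1) (by omega : (0:Int) < 12),
    PySem.Int.mod_eq_emod_of_pos (a := q.2 - p.2) (by omega : (0:Int) < 12),
    PySem.Int.mod_eq_emod_of_pos (b := (12:Int)) (by omega : (0:Int) < 12)]
  constructor
  · rintro ⟨⟨h0 | h7, hEq⟩, hm⟩
    · exact ⟨hm, Or.inl ⟨by omega, by omega⟩⟩
    · exact ⟨hm, Or.inr ⟨by omega, by omega⟩⟩
  · rintro ⟨hm, ⟨h1, h2⟩ | ⟨h1, h2⟩⟩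
    · exact ⟨⟨Or.inl (by omega), by omega⟩, hm⟩
    · exact ⟨⟨Or.inr (by omega), by omega⟩, hm⟩

-- characterization of A's nested scan
theorem hpCond_iff (v1 v2 : List Int) (i j : Nat) (hi : i < v1.length)
    (hj : j < v1.length) (h : v1.length ≤ v2.length) :
    hpCond v1 v2 (i : Int) (j : Int) = true ↔ hpC (v1[i], v2[i]) (v1[j], v2[j]) := by
  simp only [hpCond, PySem.List.pyGetD_natCast,
    List.getD_eq_getElem v1 0 hi, List.getD_eq_getElem v1 0 hj,
    List.getD_eq_getElem v2 0 (by omega : i < v2.length),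
    List.getD_eq_getElem v2 0 (by omega : j < v2.length)]
  simp [hpC, Bool.and_eq_true, beq_iff_eq, bne_iff_ne, Bool.or_eq_true, and_assoc]

theorem hpA_iff (v1 v2 : List Int) (h : v1.length ≤ v2.length) :
    has_parallel_fifths_or_octaves v1 v2 = true ↔ hpPairEx (v1.zip v2) := by
  simp only [has_parallel_fifths_or_octaves, List.any_eq_true, PySem.List.mem_pyRange_one]
  constructor
  · rintro ⟨i, ⟨hi0, hin⟩, j, ⟨hij, hjn⟩, hc⟩
    have hi : i = (i.toNat : Int) := by omega
    have hj : j = (j.toNat : Int) := by omega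
    rw [hi, hj] at hc
    have hin' : i.toNat < v1.length := by omega
    have hjn' : j.toNat < v1.length := by omega
    refine ⟨i.toNat, j.toNat, by omega, by simp [List.length_zip]; omega, ?_⟩
    simp only [List.getElem_zip]
    exact (hpCond_iff v1 v2 i.toNat j.toNat hin' hjn' h).1 hc
  · rintro ⟨i, j, hij, hjz, hc⟩
    have hjn' : j < v1.length := by simp [List.length_zip] at hjz; omega
    have hin' : i < v1.length := by omega
    refine ⟨(i : Int), ⟨by omega, by omega⟩, (j : Int), ⟨by omega, by omega⟩, ?_⟩
    refine (hpCond_iff v1 v2 i j hin' hjn' h).2 ?_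
    simpa only [List.getElem_zip] using hc

-- invariant of B's single pass
theorem hpAltLoop_iff (l : List (Int × Int)) (seen : PySem.Set (Int × Int)) :
    hpAltLoop l seen = true ↔
      ∃ (j : Nat) (hj : j < l.length), l[j].1 ≠ l[j].2 ∧
        ((hpKey l[j] ∈ seen ∨ hpKey7 l[j] ∈ seen) ∨
          ∃ (i : Nat) (_ : i < j), l[i].1 ≠ l[i].2 ∧
            (hpKey l[i] = hpKey l[j] ∨ hpKey l[i] = hpKey7 l[j])) := by
  induction l generalizing seen with
  | nil => simp [hpAltLoop]
  | cons p rest ih =>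
    simp only [hpAltLoop]
    split_ifs with hm hhit
    · simp only [Bool.or_eq_true, PySem.Set.contains_iff] at hhit
      constructor
      · intro _
        exact ⟨0, Nat.succ_pos _, by simpa using hm, Or.inl (by simpa using hhit)⟩
      · intro _; rfl
    · rw [ih]
      simp only [Bool.or_eq_true, PySem.Set.contains_iff, not_or] at hhit
      constructor
      · rintro ⟨j, hj, hmv, hcase⟩
        refine ⟨j + 1, Nat.succ_lt_succ hj, by simpa using hmv, ?_⟩
        rcases hcase with (h0 | h7) | ⟨i, hi, hmi, hk⟩
        · rw [PySem.Set.mem_add] at h0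
          rcases h0 with h0 | h0
          · exact Or.inl (Or.inl (by simpa using h0))
          · exact Or.inr ⟨0, Nat.succ_pos j, by simpa using hm, Or.inl (by simpa using h0.symm)⟩
        · rw [PySem.Set.mem_add] at h7
          rcases h7 with h7 | h7
          · exact Or.inl (Or.inr (by simpa using h7))
          · exact Or.inr ⟨0, Nat.succ_pos j, by simpa using hm, Or.inr (by simpa using h7.symm)⟩
        · exact Or.inr ⟨i + 1, Nat.succ_lt_succ hi, by simpa using hmi, by simpa using hk⟩
      · rintro ⟨j, hj, hmv, hcase⟩
        cases j with
        | zero =>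
          simp only [List.getElem_cons_zero] at hmv hcase
          rcases hcase with (h | h) | ⟨i, hi, _⟩
          · exact absurd h hhit.1
          · exact absurd h hhit.2
          · omega
        | succ j =>
          simp only [List.getElem_cons_succ] at hmv hcase
          refine ⟨j, Nat.lt_of_succ_lt_succ hj, hmv, ?_⟩
          rcases hcase with (h0 | h7) | ⟨i, hi, hmi, hk⟩
          · exact Or.inl (Or.inl ((PySem.Set.mem_add _ _ _).2 (Or.inl h0)))
          · exact Or.inl (Or.inr ((PySem.Set.mem_add _ _ _).2 (Or.inl h7)))
          · cases i with
            | zero =>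
              simp only [List.getElem_cons_zero] at hmi hk
              rcases hk with hk | hk
              · exact Or.inl (Or.inl ((PySem.Set.mem_add _ _ _).2 (Or.inr hk.symm)))
              · exact Or.inl (Or.inr ((PySem.Set.mem_add _ _ _).2 (Or.inr hk.symm)))
            | succ i =>
              exact Or.inr ⟨i, Nat.lt_of_succ_lt_succ hi, by simpa using hmi, by simpa using hk⟩
    · rw [not_not] at hm
      rw [ih]
      constructor
      · rintro ⟨j, hj, hmv, hcase⟩
        refine ⟨j + 1, Nat.succ_lt_succ hj, by simpa using hmv, ?_⟩
        rcases hcase with h | ⟨i, hi, hmi, hk⟩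
        · exact Or.inl (by simpa using h)
        · exact Or.inr ⟨i + 1, Nat.succ_lt_succ hi, by simpa using hmi, by simpa using hk⟩
      · rintro ⟨j, hj, hmv, hcase⟩
        cases j with
        | zero => exact absurd hm (by simpa using hmv)
        | succ j =>
          simp only [List.getElem_cons_succ] at hmv hcase
          refine ⟨j, Nat.lt_of_succ_lt_succ hj, hmv, ?_⟩
          rcases hcase with h | ⟨i, hi, hmi, hk⟩
          · exact Or.inl h
          · cases i with
            | zero => exact absurd hm (by simpa using hmi)
            | succ i =>
              exact Or.inr ⟨i, Nat.lt_of_succ_lt_succ hi, by simpa using hmi, by simpa using hk⟩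

theorem hpB_iff (v1 v2 : List Int) :
    has_parallel_fifths_or_octaves_alt v1 v2 = true ↔ hpPairEx (v1.zip v2) := by
  rw [has_parallel_fifths_or_octaves_alt, hpAltLoop_iff]
  simp only [PySem.Set.empty, List.not_mem_nil, or_self, false_or]
  constructor
  · rintro ⟨j, hj, hmvj, i, hi, hmvi, hk⟩
    exact ⟨i, j, hi, hj, (hpC_iff_keys _ _).2 ⟨⟨hmvi, hmvj⟩, hk⟩⟩
  · rintro ⟨i, j, hij, hj, hc⟩
    rcases (hpC_iff_keys _ _).1 hc with ⟨⟨hmvi, hmvj⟩, hk⟩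
    exact ⟨j, hj, hmvj, i, hij, hmvi, hk⟩

-- degenerate voicings: fewer than two voices, no pair is ever examined
theorem hpA_short (v1 v2 : List Int) (h : v1.length ≤ 1) :
    has_parallel_fifths_or_octaves v1 v2 = false := by
  match v1, h with
  | [], _ =>
    simp [has_parallel_fifths_or_octaves, PySem.List.pyRange_one_eq_nil (le_refl (0 : Int))]
  | [x], _ =>
    simp only [has_parallel_fifths_or_octaves, List.length_cons, List.length_nil]
    have hcast : ((0 + 1 : Nat) : Int) = 0 + 1 := by norm_num
    rw [hcast, PySem.List.pyRange_one_singleton (a := 0)]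
    simp

theorem hpB_short (v1 v2 : List Int) (h : v1.length ≤ 1) :
    has_parallel_fifths_or_octaves_alt v1 v2 = false := by
  rw [← Bool.not_eq_true, hpB_iff]
  rintro ⟨i, j, hij, hj, -⟩
  have := List.length_zip (l₁ := v1) (l₂ := v2)
  omega

-- ===== VERDICT (by name: the statement is the Claim_ definition above) =====
theorem has_parallel_fifths_or_octaves_spec : Claim_equal_has_parallel_fifths_or_octaves := by
  intro v1 v2 _ hpre
  unfold Spec_has_parallel_fifths_or_octaves
  by_cases h : v1.length ≤ v2.length
  · rcases Bool.eq_false_or_eq_true (has_parallel_fifths_or_octaves_alt v1 v2) with hb | hb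
    · rw [hb, (hpA_iff v1 v2 h).2 ((hpB_iff v1 v2).1 hb)]
    · rw [hb]
      by_contra ha
      have := (hpA_iff v1 v2 h).1 (by revert ha; cases has_parallel_fifths_or_octaves v1 v2 <;> simp)
      exact absurd ((hpB_iff v1 v2).2 this) (by simp [hb])
  · have h1 : v1.length ≤ 1 := by
      rcases hpre with h' | h'
      · omega
      · exact h'
    rw [hpA_short v1 v2 h1, hpB_short v1 v2 h1]
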